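-- pv_equiv track=rewrite | github.com/BaeLab/STRiker | analyze_func_pysam/analyze_func.py | select_best_motif
-- ===== SOURCE A (Python) =====
-- def select_best_motif(group_members, known_motifs):
--     """
--     회전 그룹에서 최적의 대표 motif를 선택
--
--     선택 기준:
--     1. known_motif로 시작하는 것 우선
--     2. known_motif가 여러 개면 카운트가 더 높은 것
--     3. known_motif가 없으면 카운트가 높은 것
--     4. 카운트가 같으면 길이가 긴 것
--     5. 길이도 같으면 알파벳 순서
--     """
--     if not group_members:
--         return None
--
--     # known_motif로 시작하는 것들 찾기
--     known_starting_candidates = []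
--     for motif, count in group_members:
--         for known_motif in known_motifs:
--             if motif.startswith(known_motif):
--                 known_starting_candidates.append((motif, count, known_motif))
--                 break
--
--     # 1. known_motif로 시작하는 것이 있으면 그 중에서 선택
--     if known_starting_candidates:
--         # 카운트 내림차순, 길이 내림차순, 알파벳 오름차순으로 정렬
--         best_candidate = sorted(known_starting_candidates,
--                               key=lambda x: (-x[1], -len(x[0]), x[0]))[0]
--         return best_candidate[0]
--
--     # 2. known_motif로 시작하는 것이 없으면 일반 기준으로 선택
--     # 카운트 내림차순, 길이 내림차순, 알파벳 오름차순으로 정렬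
--     best_motif = sorted(group_members,
--                        key=lambda x: (-x[1], -len(x[0]), x[0]))[0]
--     return best_motif[0]
-- ===== SOURCE B (Python) =====
-- def select_best_motif(group_members, known_motifs):
--     if not group_members:
--         return None
--     best = min(group_members,
--                key=lambda x: (not any(x[0].startswith(k) for k in known_motifs),
--                               -x[1], -len(x[0]), x[0]))
--     return best[0]
-- ===== Notes on version B (the rewrite author's own statement) =====
-- stated objective: simpler
-- what changed: Replaces A's build-a-filtered-candidate-list plus two conditional sorts with a single min over all members using one composite key (has-known-prefix first, then -count, -length, motif).
import Mathlib
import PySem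

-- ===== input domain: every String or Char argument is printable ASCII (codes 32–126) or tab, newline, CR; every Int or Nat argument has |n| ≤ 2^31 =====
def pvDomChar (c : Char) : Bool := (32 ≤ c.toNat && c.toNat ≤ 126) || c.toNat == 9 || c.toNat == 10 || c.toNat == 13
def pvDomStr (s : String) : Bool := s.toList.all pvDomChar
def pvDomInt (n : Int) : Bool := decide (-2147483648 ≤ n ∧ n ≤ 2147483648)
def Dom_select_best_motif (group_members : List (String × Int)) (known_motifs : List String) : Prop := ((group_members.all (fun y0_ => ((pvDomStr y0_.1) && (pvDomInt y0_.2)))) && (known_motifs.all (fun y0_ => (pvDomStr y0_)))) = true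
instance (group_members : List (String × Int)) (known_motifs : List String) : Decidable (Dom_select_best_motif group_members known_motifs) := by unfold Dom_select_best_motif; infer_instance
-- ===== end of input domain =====

-- B replaces A's filtered candidate list and two conditional sorts by a single min with one composite key (simpler, one uniform selection).

-- ===== PORT A =====
def select_best_motif (group_members : List (String × Int)) (known_motifs : List String) : Option String :=
  if group_members = [] then none
  else
    -- inner for-loop with break = first known_motif the motif starts with
    let known_starting_candidates : List (String × Int × String) :=
      group_members.foldl (fun acc x =>
        match known_motifs.find? (fun k => PySem.Str.startswith x.1 k) with
        | some k => acc ++ [(x.1, x.2, k)]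
        | none => acc) []
    match known_starting_candidates with
    | _ :: _ =>
      match PySem.List.sorted known_starting_candidates
          (fun c => toLex ((-c.2.1 : Int), toLex (-(PySem.Str.len c.1), c.1))) false with
      | c :: _ => some c.1
      | [] => none
    | [] =>
      match PySem.List.sorted group_members
          (fun x => toLex (-x.2, toLex (-(PySem.Str.len x.1), x.1))) false with
      | m :: _ => some m.1
      | [] => none

-- ===== PORT B =====
def select_best_motif_alt (group_members : List (String × Int)) (known_motifs : List String) : Option String :=
  match PySem.List.min? group_members
      (fun x => toLex (!(known_motifs.any (fun k => PySem.Str.startswith x.1 k)),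
        toLex (-x.2, toLex (-(PySem.Str.len x.1), x.1)))) with
  | some m => some m.1
  | none => none

-- ===== PRECONDITION & SPEC =====
def Spec_select_best_motif (group_members : List (String × Int)) (known_motifs : List String) (out : Option String) : Prop := out = select_best_motif_alt group_members known_motifs
instance (group_members : List (String × Int)) (known_motifs : List String) (out : Option String) : Decidable (Spec_select_best_motif group_members known_motifs out) := by unfold Spec_select_best_motif; infer_instance

-- ===== CLAIM (what is proved, stated in full; the proofs are below) =====
def Claim_equal_select_best_motif : Prop := ∀ (group_members : List (String × Int)) (known_motifs : List String), Dom_select_best_motif group_members known_motifs → Spec_select_best_motif group_members known_motifs (select_best_motif group_members known_motifs)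

-- ===== LEMMAS AND PROOFS =====

-- the sort/min key (-count, -len(motif), motif) both Pythons use, as a lexicographic tuple
def pvKey3 (x : String × Int) : Lex (Int × Lex (Int × String)) :=
  toLex (-x.2, toLex (-(PySem.Str.len x.1), x.1))

-- has-known-prefix predicate
def pvHp (km : List String) (x : String × Int) : Bool :=
  km.any (fun k => PySem.Str.startswith x.1 k)

-- B's composite key
def pvKey4 (km : List String) (x : String × Int) : Lex (Bool × Lex (Int × Lex (Int × String))) :=
  toLex (!pvHp km x, pvKey3 x)

theorem pvKey3_str_eq {x y : String × Int} (h : pvKey3 x = pvKey3 y) : x.1 = y.1 := by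
  unfold pvKey3 at h
  have h' := (toLex (α := Int × Lex (Int × String))).injective h
  have h2 := congrArg Prod.snd h'
  have h3 := (toLex (α := Int × String)).injective h2
  exact congrArg Prod.snd h3

theorem pvLex_le_snd {α β : Type} [LinearOrder α] [LinearOrder β] {a : α} {b c : β}
    (h : toLex (a, b) ≤ toLex (a, c)) : b ≤ c := by
  rcases Prod.Lex.le_iff.mp h with h1 | h2
  · exact absurd h1 (lt_irrefl a)
  · exact h2.2

theorem pvLex_le_fst {β : Type} [LinearOrder β] {b : Bool} {y z : β}
    (h : toLex (b, y) ≤ toLex (false, z)) : b = false := by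
  rcases Prod.Lex.le_iff.mp h with h1 | h2
  · simp [Bool.lt_iff] at h1
  · exact h2.1

-- the candidate fold as a filterMap
theorem pvCands_eq (gm : List (String × Int)) (km : List String) (acc : List (String × Int × String)) :
    gm.foldl (fun acc x =>
        match km.find? (fun k => PySem.Str.startswith x.1 k) with
        | some k => acc ++ [(x.1, x.2, k)]
        | none => acc) acc
    = acc ++ gm.filterMap (fun x =>
        (km.find? (fun k => PySem.Str.startswith x.1 k)).map (fun k => (x.1, x.2, k))) := by
  induction gm generalizing acc with
  | nil => simp
  | cons x t ih =>
    cases h : km.find? (fun k => PySem.Str.startswith x.1 k) with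
    | none =>
      simp only [List.foldl_cons, h]
      rw [ih]
      simp only [List.filterMap_cons, h, Option.map_none]
    | some k =>
      simp only [List.foldl_cons, h]
      rw [ih]
      simp only [List.filterMap_cons, h, Option.map_some, List.append_assoc, List.singleton_append]

theorem pvMem_cands {gm : List (String × Int)} {km : List String} {c : String × Int × String}
    (h : c ∈ gm.filterMap (fun x =>
        (km.find? (fun k => PySem.Str.startswith x.1 k)).map (fun k => (x.1, x.2, k)))) :
    ∃ x ∈ gm, x.1 = c.1 ∧ x.2 = c.2.1 ∧ pvHp km x = true := by
  rcases List.mem_filterMap.mp h with ⟨x, hx, hfx⟩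
  cases hfind : km.find? (fun k => PySem.Str.startswith x.1 k) with
  | none => rw [hfind] at hfx; simp at hfx
  | some k =>
    rw [hfind] at hfx
    simp at hfx
    refine ⟨x, hx, ?_, ?_, ?_⟩
    · rw [← hfx]
    · rw [← hfx]
    · have := List.find?_some hfind
      exact List.any_eq_true.mpr ⟨k, List.mem_of_find?_eq_some hfind, this⟩

theorem pvHp_mem_cands {gm : List (String × Int)} {km : List String} {x : String × Int}
    (hx : x ∈ gm) (hp : pvHp km x = true) :
    ∃ c ∈ gm.filterMap (fun x =>
        (km.find? (fun k => PySem.Str.startswith x.1 k)).map (fun k => (x.1, x.2, k))),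
      c.1 = x.1 ∧ c.2.1 = x.2 := by
  rcases List.any_eq_true.mp hp with ⟨k, hk, hsw⟩
  have : (km.find? (fun k => PySem.Str.startswith x.1 k)).isSome := by
    rw [List.find?_isSome]; exact ⟨k, hk, hsw⟩
  rcases Option.isSome_iff_exists.mp this with ⟨k', hk'⟩
  exact ⟨(x.1, x.2, k'), List.mem_filterMap.mpr ⟨x, hx, by rw [hk']; rfl⟩, rfl, rfl⟩

theorem pvCands_nil {gm : List (String × Int)} {km : List String}
    (h : gm.filterMap (fun x =>
        (km.find? (fun k => PySem.Str.startswith x.1 k)).map (fun k => (x.1, x.2, k))) = []) :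
    ∀ x ∈ gm, pvHp km x = false := by
  intro x hx
  by_contra hne
  have hp : pvHp km x = true := by cases h' : pvHp km x <;> simp [h'] at hne ⊢
  rcases pvHp_mem_cands hx hp with ⟨c, hc, _⟩
  rw [h] at hc
  exact absurd hc (List.not_mem_nil)

-- ===== VERDICT (by name: the statement is the Claim_ definition above) =====
theorem select_best_motif_spec : Claim_equal_select_best_motif := by
  intro gm km _
  unfold Spec_select_best_motif select_best_motif select_best_motif_alt
  by_cases hgm : gm = []
  · subst hgm; simp [PySem.List.min?]
  · simp only [if_neg hgm]
    rw [show (fun x : String × Int => toLex (-x.2, toLex (-(PySem.Str.len x.1), x.1))) = pvKey3 from rfl,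
        show (fun c : String × Int × String => toLex ((-c.2.1 : Int), toLex (-(PySem.Str.len c.1), c.1)))
          = (fun c => pvKey3 (c.1, c.2.1)) from rfl,
        show (fun x : String × Int => toLex (!(km.any (fun k => PySem.Str.startswith x.1 k)),
            toLex (-x.2, toLex (-(PySem.Str.len x.1), x.1))))
          = (fun x => toLex (!(km.any (fun k => PySem.Str.startswith x.1 k)), pvKey3 x)) from rfl]
    rw [pvCands_eq gm km []]
    simp only [List.nil_append]
    set fC := fun x : String × Int =>
        (km.find? (fun k => PySem.Str.startswith x.1 k)).map (fun k => (x.1, x.2, k)) with hfC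
    -- B's minimum exists
    have hBne : PySem.List.min? gm (fun x => toLex (!(km.any (fun k => PySem.Str.startswith x.1 k)), pvKey3 x)) ≠ none := by
      intro h; exact hgm ((PySem.List.min?_eq_none_iff _ _).mp h)
    rcases Option.ne_none_iff_exists'.mp hBne with ⟨m', hm'⟩
    have hm'mem : m' ∈ gm := PySem.List.min?_mem hm'
    have hm'min : ∀ y ∈ gm, pvKey4 km m' ≤ pvKey4 km y := by
      intro y hy
      exact PySem.List.min?_isMin hm' y hy
    rw [hm']
    cases hc : gm.filterMap fC with
    | nil =>
      -- nobody has a known prefix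
      have hall := pvCands_nil hc
      have hsne : PySem.List.sorted gm pvKey3 false ≠ [] := by
        intro h; exact hgm ((PySem.List.sorted_eq_nil_iff _ _ _).mp h)
      cases hs : PySem.List.sorted gm pvKey3 false with
      | nil => exact absurd hs hsne
      | cons m t =>
        have hmmem : m ∈ gm := (PySem.List.mem_sorted _ _ _ _).mp (hs ▸ List.mem_cons_self)
        have h1 : pvKey3 m ≤ pvKey3 m' := PySem.List.key_head_sorted_le _ _ hs m' hm'mem
        have h2 : pvKey3 m' ≤ pvKey3 m := by
          have := hm'min m hmmem
          unfold pvKey4 at this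
          rw [hall m' hm'mem, hall m hmmem] at this
          exact pvLex_le_snd this
        have : pvKey3 m = pvKey3 m' := le_antisymm h1 h2
        simp [pvKey3_str_eq this]
    | cons c0 cs =>
      have hsne : PySem.List.sorted (c0 :: cs) (fun c => pvKey3 (c.1, c.2.1)) false ≠ [] := by
        intro h; simpa using (PySem.List.sorted_eq_nil_iff _ _ _).mp h
      cases hs : PySem.List.sorted (c0 :: cs) (fun c => pvKey3 (c.1, c.2.1)) false with
      | nil => exact absurd hs hsne
      | cons c t =>
        have hcmem : c ∈ gm.filterMap fC := by
          rw [hc]; exact (PySem.List.mem_sorted _ _ _ _).mp (hs ▸ List.mem_cons_self)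
        rcases pvMem_cands hcmem with ⟨xc, hxcmem, hxc1, hxc2, hxchp⟩
        -- m' has a known prefix
        have hm'hp : pvHp km m' = true := by
          have hle := hm'min xc hxcmem
          unfold pvKey4 at hle
          rw [hxchp] at hle
          have := pvLex_le_fst hle
          cases h' : pvHp km m' with
          | true => rfl
          | false => rw [h'] at this; simp at this
        -- m' yields a candidate
        rcases pvHp_mem_cands hm'mem hm'hp with ⟨cm, hcmmem, hcm1, hcm2⟩
        have h1 : pvKey3 (c.1, c.2.1) ≤ pvKey3 m' := by
          have := PySem.List.key_head_sorted_le _ _ hs cm (hc ▸ hcmmem)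
          rw [show pvKey3 (cm.1, cm.2.1) = pvKey3 m' by rw [hcm1, hcm2]] at this
          exact this
        have h2 : pvKey3 m' ≤ pvKey3 (c.1, c.2.1) := by
          have hle := hm'min xc hxcmem
          unfold pvKey4 at hle
          rw [hxchp, hm'hp] at hle
          have := pvLex_le_snd hle
          rw [show pvKey3 xc = pvKey3 (c.1, c.2.1) by rw [show (c.1, c.2.1) = (xc.1, xc.2) by rw [hxc1, hxc2]]] at this
          exact this
        have heq : pvKey3 (c.1, c.2.1) = pvKey3 m' := le_antisymm h1 h2
        have := pvKey3_str_eq heq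
        simp at this
        simp [this]
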